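-- pv_equiv track=rewrite | github.com/santoshr1016/WeekendMasala | itsybitsy/Rakutan/amex.py | solution
-- ===== SOURCE A (Python) =====
-- def solution(pwd):
--     pwd.lower()
--     words = pwd.split(' ')
--     res = []
--     for word in words:
--         alpha_numeric = 0
--         digits = 0
--         for ch in word:
--             if ch.isalpha():
--                 alpha_numeric += 1
--             if ch.isdigit():
--                 digits += 1
--             if ch in "[@_!#$%^&*()<>?/\|}{~:]":
--                 break
--         if digits % 2 and not alpha_numeric % 2:
--             alpha_numeric += digits
--             res.append(alpha_numeric)
--
--     if len(res) == 0:
--         return -1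
--
--     res.sort()
--     return res.pop()
-- ===== SOURCE B (Python) =====
-- SPECIALS = set("[@_!#$%^&*()<>?/\\|}{~:]")
--
-- def solution(pwd):
--     best = -1
--     for word in pwd.split(' '):
--         i = 0
--         while i < len(word) and word[i] not in SPECIALS:
--             i += 1
--         prefix = word[:i]
--         d = sum(c.isdigit() for c in prefix)
--         a = sum(c.isalpha() for c in prefix)
--         if d % 2 == 1 and a % 2 == 0:
--             best = max(best, a + d)
--     return best
-- ===== Notes on version B (the rewrite author's own statement) =====
-- stated objective: simpler
-- what changed: B isolates each word's prefix before the first special character and counts digits/alphas over it, keeping a running maximum, instead of A's fused count-and-break loop plus collecting results into a list that is sorted and popped.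
import Mathlib
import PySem

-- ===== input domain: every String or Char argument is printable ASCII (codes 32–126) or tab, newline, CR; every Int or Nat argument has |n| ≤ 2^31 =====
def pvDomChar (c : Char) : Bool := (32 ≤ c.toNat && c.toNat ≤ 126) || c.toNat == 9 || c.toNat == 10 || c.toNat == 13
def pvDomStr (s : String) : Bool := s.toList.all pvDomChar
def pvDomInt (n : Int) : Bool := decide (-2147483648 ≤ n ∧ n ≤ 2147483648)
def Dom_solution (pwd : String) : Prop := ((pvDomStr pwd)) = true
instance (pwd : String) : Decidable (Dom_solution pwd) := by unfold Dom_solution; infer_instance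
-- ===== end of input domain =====

-- B computes the same result with a prefix-then-count decomposition and a running maximum
-- instead of A's fused break loop plus list/sort/pop; objective: simpler.

-- ===== PORT A =====
def specialsA : List Char := "[@_!#$%^&*()<>?/\\|}{~:]".toList

-- inner for-loop of A with its break: returns (alpha_numeric, digits)
def aScan : List Char → Int → Int → Int × Int
  | [], al, dg => (al, dg)
  | c :: rest, al, dg =>
    let al := if PySem.Chars.isalpha c then al + 1 else al
    let dg := if PySem.Chars.isdigit c then dg + 1 else dg
    if c ∈ specialsA then (al, dg) else aScan rest al dg

def solution (pwd : String) : Int :=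
  let _ := PySem.Str.lower pwd   -- pwd.lower(): result discarded, as in A
  let words := PySem.Chars.splitOn pwd.toList [' ']
  let res := words.foldl (fun res w =>
    let p := aScan w 0 0
    if p.2 % 2 ≠ 0 ∧ p.1 % 2 = 0 then res ++ [p.1 + p.2] else res) []
  if res.length = 0 then -1
  else
    match PySem.List.pop? (PySem.List.sorted res (fun x => x) false) (-1) with
    | some (v, _) => v
    | none => -1

-- ===== PORT B =====
def specialsB : List Char := "[@_!#$%^&*()<>?/\\|}{~:]".toList

def solution_alt (pwd : String) : Int :=
  (PySem.Chars.splitOn pwd.toList [' ']).foldl (fun best w =>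
    let pref := w.takeWhile (fun c => c ∉ specialsB)
    let d : Int := pref.countP PySem.Chars.isdigit
    let a : Int := pref.countP PySem.Chars.isalpha
    if d % 2 = 1 ∧ a % 2 = 0 then max best (a + d) else best) (-1)

-- ===== PRECONDITION & SPEC =====
def Spec_solution (pwd : String) (out : Int) : Prop := out = solution_alt pwd
instance (pwd : String) (out : Int) : Decidable (Spec_solution pwd out) := by unfold Spec_solution; infer_instance

-- ===== CLAIM (what is proved, stated in full; the proofs are below) =====
def Claim_equal_solution : Prop := ∀ (pwd : String), Dom_solution pwd → Spec_solution pwd (solution pwd)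

-- ===== LEMMAS AND PROOFS =====

def pvVal (w : List Char) : Option Int :=
  let pref := w.takeWhile (fun c => c ∉ specialsA)
  let d : Int := pref.countP PySem.Chars.isdigit
  let a : Int := pref.countP PySem.Chars.isalpha
  if d % 2 = 1 ∧ a % 2 = 0 then some (a + d) else none

lemma specialsA_chars : specialsA =
    ['[', '@', '_', '!', '#', '$', '%', '^', '&', '*', '(', ')', '<', '>', '?', '/', '\\', '|', '}', '{', '~', ':', ']'] := rfl

lemma spec_not_alnum : ∀ c ∈ specialsA,
    PySem.Chars.isalpha c = false ∧ PySem.Chars.isdigit c = false := by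
  intro c hc
  rw [specialsA_chars] at hc
  fin_cases hc <;> decide

lemma aScan_eq (l : List Char) : ∀ (al dg : Int),
    aScan l al dg =
      (al + ((l.takeWhile (fun c => c ∉ specialsA)).countP PySem.Chars.isalpha : Int),
       dg + ((l.takeWhile (fun c => c ∉ specialsA)).countP PySem.Chars.isdigit : Int)) := by
  induction l with
  | nil => intro al dg; simp [aScan]
  | cons c rest ih =>
    intro al dg
    by_cases hs : c ∈ specialsA
    · obtain ⟨ha, hd⟩ := spec_not_alnum c hs
      simp [aScan, hs, ha, hd]
    · have htw : List.takeWhile (fun c => decide (c ∉ specialsA)) (c :: rest)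
          = c :: List.takeWhile (fun c => decide (c ∉ specialsA)) rest :=
        List.takeWhile_cons_of_pos (by simpa using hs)
      simp only [aScan, hs, if_false, ih, htw, List.countP_cons, Prod.mk.injEq]
      constructor <;> split_ifs <;> push_cast <;> omega

lemma stepA_eq (res : List Int) (w : List Char) :
    (let p := aScan w 0 0;
     if p.2 % 2 ≠ 0 ∧ p.1 % 2 = 0 then res ++ [p.1 + p.2] else res)
    = res ++ (pvVal w).toList := by
  have h := aScan_eq w 0 0
  simp only [h, pvVal, zero_add]
  have hd : (0:Int) ≤ ((w.takeWhile (fun c => c ∉ specialsA)).countP PySem.Chars.isdigit : Int) :=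
    Int.natCast_nonneg _
  by_cases h1 : ((w.takeWhile (fun c => c ∉ specialsA)).countP PySem.Chars.isdigit : Int) % 2 = 1 ∧
      ((w.takeWhile (fun c => c ∉ specialsA)).countP PySem.Chars.isalpha : Int) % 2 = 0
  · rw [if_pos h1, if_pos ⟨by omega, h1.2⟩]
    simp
  · rw [if_neg h1, if_neg (by omega)]
    simp

lemma foldlA (ws : List (List Char)) : ∀ (acc : List Int),
    ws.foldl (fun res w =>
      let p := aScan w 0 0;
      if p.2 % 2 ≠ 0 ∧ p.1 % 2 = 0 then res ++ [p.1 + p.2] else res) acc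
    = acc ++ ws.filterMap pvVal := by
  induction ws with
  | nil => intro acc; simp
  | cons w rest ih =>
    intro acc
    rw [List.foldl_cons, List.filterMap_cons, stepA_eq, ih]
    cases pvVal w <;> simp

lemma foldlB (ws : List (List Char)) : ∀ (best : Int),
    ws.foldl (fun best w =>
      let pref := w.takeWhile (fun c => c ∉ specialsB)
      let d : Int := pref.countP PySem.Chars.isdigit
      let a : Int := pref.countP PySem.Chars.isalpha
      if d % 2 = 1 ∧ a % 2 = 0 then max best (a + d) else best) best
    = (ws.filterMap pvVal).foldl max best := by
  have hBA : specialsB = specialsA := rfl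
  induction ws with
  | nil => intro best; simp
  | cons w rest ih =>
    intro best
    simp only [List.foldl_cons, List.filterMap_cons, hBA]
    by_cases h1 : ((w.takeWhile (fun c => c ∉ specialsA)).countP PySem.Chars.isdigit : Int) % 2 = 1 ∧
        ((w.takeWhile (fun c => c ∉ specialsA)).countP PySem.Chars.isalpha : Int) % 2 = 0
    · have hv : pvVal w = some (((w.takeWhile (fun c => c ∉ specialsA)).countP PySem.Chars.isalpha : Int)
          + ((w.takeWhile (fun c => c ∉ specialsA)).countP PySem.Chars.isdigit : Int)) := by
        simp only [pvVal]; rw [if_pos h1]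
      rw [if_pos h1, hv]
      exact ih _
    · have hv : pvVal w = none := by
        simp only [pvVal]; rw [if_neg h1]
      rw [if_neg h1, hv]
      exact ih best

lemma pvVal_nonneg {w : List Char} {v : Int} (h : pvVal w = some v) : 0 ≤ v := by
  simp only [pvVal] at h
  split_ifs at h with h1
  · simp only [Option.some.injEq] at h
    have := Int.natCast_nonneg ((w.takeWhile (fun c => c ∉ specialsA)).countP PySem.Chars.isdigit)
    have := Int.natCast_nonneg ((w.takeWhile (fun c => c ∉ specialsA)).countP PySem.Chars.isalpha)
    omega

lemma pairwise_le_getLast : ∀ (l : List Int) (h : l ≠ []),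
    l.Pairwise (· ≤ ·) → ∀ y ∈ l, y ≤ l.getLast h := by
  intro l
  induction l with
  | nil => intro h; exact absurd rfl h
  | cons a rest ih =>
    intro _ hp y hy
    rcases rest with _ | ⟨b, t⟩
    · simp at hy; simp [hy]
    · rw [List.getLast_cons (by simp)]
      rcases List.mem_cons.mp hy with h1 | h1
      · subst h1
        have hmem := List.getLast_mem (l := b :: t) (by simp)
        exact (List.pairwise_cons.mp hp).1 _ hmem
      · exact ih (by simp) (List.pairwise_cons.mp hp).2 y h1

lemma maxfin (res : List Int) (hnn : ∀ x ∈ res, 0 ≤ x) :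
    (if res.length = 0 then (-1 : Int)
     else match PySem.List.pop? (PySem.List.sorted res (fun x => x) false) with
          | some (v, _) => v
          | none => -1)
    = res.foldl max (-1) := by
  rcases res with _ | ⟨x, t⟩
  · simp
  · rw [if_neg (by simp)]
    set s := PySem.List.sorted (x :: t) (fun x => x) false with hs
    have hsne : s ≠ [] := by
      rw [hs, Ne, PySem.List.sorted_eq_nil_iff]; simp
    have hsplit : s.dropLast ++ [s.getLast hsne] = s := List.dropLast_append_getLast hsne
    rw [← hsplit, PySem.List.pop?_last]
    have hM0 : List.foldl max (-1 : Int) (x :: t) = List.foldl max x t := by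
      rw [List.foldl_cons, max_eq_right (by linarith [hnn x (by simp)])]
    rw [hM0]
    set M := List.foldl max x t with hM
    set m := s.getLast hsne with hm
    have hMmem : M ∈ x :: t := by
      rcases PySem.List.foldl_max_mem t x with h | h
      · rw [hM, h]; simp
      · rw [hM]; exact List.mem_cons_of_mem _ h
    have hMub : ∀ y ∈ x :: t, y ≤ M := by
      intro y hy
      rcases List.mem_cons.mp hy with h | h
      · rw [h, hM]; exact (PySem.List.le_foldl_max t x).1
      · rw [hM]; exact (PySem.List.le_foldl_max t x).2 y h
    have hmmem : m ∈ x :: t :=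
      (PySem.List.mem_sorted (x :: t) (fun x => x) false m).mp (List.getLast_mem hsne)
    have hmub : ∀ y ∈ x :: t, y ≤ m := by
      intro y hy
      have hys : y ∈ s := by
        rw [hs, PySem.List.mem_sorted]; exact hy
      have hp : s.Pairwise (· ≤ ·) := by
        have := PySem.List.sorted_pairwise (x :: t) (fun x => x)
        simpa [← hs] using this
      exact pairwise_le_getLast s hsne hp y hys
    show m = M
    exact le_antisymm (hMub m hmmem) (hmub M hMmem)

-- ===== VERDICT (by name: the statement is the Claim_ definition above) =====
theorem solution_spec : Claim_equal_solution := by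
  intro pwd _
  unfold Spec_solution solution solution_alt
  dsimp only
  rw [foldlA _ [], foldlB _ (-1), List.nil_append]
  exact maxfin _ (by
    intro x hx
    rcases List.mem_filterMap.mp hx with ⟨w, _, hw⟩
    exact pvVal_nonneg hw)
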